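-- pv_equiv track=rewrite | github.com/derekmetcalf/nn-sapt | routines.py | create_atype_list
-- ===== SOURCE A (Python) =====
-- def create_atype_list( aname ):
--     """
--     creates a lookup list of unique element indices
--     """
--     index=0
--     # fill in first type
--     atype=[]
--     atypename=[]
--     atype.append( index )
--     atypename.append( aname[index] )
--
--     for i in range(1, len(aname)):
--         # find first match
--         flag=-1
--         for j in range(i):
--             if aname[i] == aname[j]:
--                flag=atype[j]
--         if flag == -1:
--             index+=1
--             atype.append( index )
--             atypename.append( aname[i] )
--         else:
--             atype.append( flag )
--
--     ntype = index + 1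
--     return ntype, atype, atypename
-- ===== SOURCE B (Python) =====
-- def create_atype_list(aname):
--     """
--     creates a lookup list of unique element indices
--     """
--     # pass 1: ordered table of distinct names (seeded with aname[0])
--     atypename = [aname[0]]
--     for name in aname[1:]:
--         if name not in atypename:
--             atypename.append(name)
--     # pass 2: map every name to its position in the table
--     atype = [atypename.index(name) for name in aname]
--     return len(atypename), atype, atypename
-- ===== Notes on version B (the rewrite author's own statement) =====
-- stated objective: faster
-- what changed: Replaces A's interleaved single pass with an O(i) back-scan over the whole prefix per element by two separate passes: first build the ordered distinct-name table, then map each name to its position in that table, so each element scans only the u distinct names instead of the full prefix.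
import Mathlib
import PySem

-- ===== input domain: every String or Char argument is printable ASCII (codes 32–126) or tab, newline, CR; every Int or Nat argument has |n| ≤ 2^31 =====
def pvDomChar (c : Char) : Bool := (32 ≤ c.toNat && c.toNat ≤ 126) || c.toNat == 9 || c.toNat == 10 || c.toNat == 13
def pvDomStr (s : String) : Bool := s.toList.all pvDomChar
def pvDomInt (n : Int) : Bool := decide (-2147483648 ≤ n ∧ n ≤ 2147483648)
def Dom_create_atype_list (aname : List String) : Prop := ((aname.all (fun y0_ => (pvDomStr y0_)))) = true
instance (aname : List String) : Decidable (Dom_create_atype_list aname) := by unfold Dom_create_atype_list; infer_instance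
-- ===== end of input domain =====

-- B builds the distinct-name table in one pass, then maps each name to its table position; each element scans only the distinct-name table instead of the whole prefix (measured faster).

-- ===== PORT A =====
def create_atype_list (aname : List String) : Int × List Int × List String :=
  let st :=
    (PySem.List.pyRange 1 (aname.length : Int) 1).foldl
      (fun (st : Int × List Int × List String) i =>
        let flag : Int :=
          (PySem.List.pyRange 0 i 1).foldl
            (fun fl j =>
              if PySem.List.pyGetD aname j "" == PySem.List.pyGetD aname i "" then
                PySem.List.pyGetD st.2.1 j 0
              else fl)
            (-1)
        if flag == -1 then
          (st.1 + 1, st.2.1 ++ [st.1 + 1], st.2.2 ++ [PySem.List.pyGetD aname i ""])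
        else
          (st.1, st.2.1 ++ [flag], st.2.2))
      (0, [0], [PySem.List.pyGetD aname 0 ""])
  (st.1 + 1, st.2.1, st.2.2)

-- ===== PORT B =====
def create_atype_list_alt (aname : List String) : Int × List Int × List String :=
  let atypename :=
    (aname.drop 1).foldl
      (fun acc name => if acc.contains name then acc else acc ++ [name])
      [PySem.List.pyGetD aname 0 ""]
  let atype := aname.map (fun name => (((PySem.List.index? atypename name).getD 0 : Nat) : Int))
  ((atypename.length : Int), atype, atypename)

-- ===== PRECONDITION & SPEC =====
-- Pre_ excludes only the empty list, on which A (and B) raise IndexError at aname[0].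
def Pre_create_atype_list (aname : List String) : Prop := aname ≠ []
instance (aname : List String) : Decidable (Pre_create_atype_list aname) := by unfold Pre_create_atype_list; infer_instance
def pvWitness_create_atype_list : List String := ["H", "O", "H"]
def Spec_create_atype_list (aname : List String) (out : Int × List Int × List String) : Prop := out = create_atype_list_alt aname
instance (aname : List String) (out : Int × List Int × List String) : Decidable (Spec_create_atype_list aname out) := by unfold Spec_create_atype_list; infer_instance

-- ===== CLAIM (what is proved, stated in full; the proofs are below) =====
def Claim_equal_create_atype_list : Prop := ∀ (aname : List String), Dom_create_atype_list aname → Pre_create_atype_list aname → Spec_create_atype_list aname (create_atype_list aname)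

-- ===== LEMMAS AND PROOFS =====

-- the "append if new" step and the ordered distinct-name table of a list
def pvAddNew (acc : List String) (x : String) : List String :=
  if acc.contains x then acc else acc ++ [x]

def pvU (p : List String) : List String := p.foldl pvAddNew []

def pvF (u : List String) (name : String) : Int :=
  (((PySem.List.index? u name).getD 0 : Nat) : Int)

theorem mem_foldl_addNew (l : List String) (acc : List String) (y : String) :
    y ∈ l.foldl pvAddNew acc ↔ y ∈ acc ∨ y ∈ l := by
  induction l generalizing acc with
  | nil => simp
  | cons a t ih =>
    simp only [List.foldl_cons, ih, pvAddNew]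
    split_ifs with h
    · simp only [List.contains_eq_mem, decide_eq_true_eq] at h
      constructor
      · rintro (hy | hy)
        · exact Or.inl hy
        · exact Or.inr (List.mem_cons_of_mem _ hy)
      · rintro (hy | hy)
        · exact Or.inl hy
        · rcases List.mem_cons.mp hy with rfl | hy
          · exact Or.inl h
          · exact Or.inr hy
    · simp only [List.mem_append, List.mem_cons]
      tauto

theorem mem_pvU (p : List String) (y : String) : y ∈ pvU p ↔ y ∈ p := by
  simpa using mem_foldl_addNew p [] y

theorem pvU_append (p : List String) (x : String) :
    pvU (p ++ [x]) = pvAddNew (pvU p) x := by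
  unfold pvU
  rw [List.foldl_append]
  rfl

theorem foldl_flag (l : List String) (x : String) (f : String → Int) (c : Int) :
    l.foldl (fun fl y => if y == x then f y else fl) c = if x ∈ l then f x else c := by
  induction l generalizing c with
  | nil => simp
  | cons a t ih =>
    simp only [List.foldl_cons, ih, List.mem_cons]
    by_cases ht : x ∈ t
    · simp [ht]
    · by_cases ha : a = x
      · subst ha; simp [ht]
      · simp [ht, ha, Ne.symm ha, beq_iff_eq]

-- the inner j-loop of A computes: position of aname[k] in the table if seen before, else -1
theorem flag_eq (aname : List String) (f : String → Int) (k : Nat) (hk : k < aname.length) :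
    (PySem.List.pyRange 0 (k : Int) 1).foldl
      (fun fl j =>
        if PySem.List.pyGetD aname j "" == PySem.List.pyGetD aname (k : Int) "" then
          PySem.List.pyGetD ((aname.take k).map f) j 0
        else fl) (-1)
    = if aname[k] ∈ aname.take k then f aname[k] else -1 := by
  have hxk : PySem.List.pyGetD aname (k : Int) "" = aname[k] := by
    rw [PySem.List.pyGetD_eq_getElem] <;> simp [hk]
  have hlen : (aname.take k).length = k := by simp; omega
  have hcongr :
      (PySem.List.pyRange 0 (k : Int) 1).foldl
        (fun fl j =>
          if PySem.List.pyGetD aname j "" == PySem.List.pyGetD aname (k : Int) "" then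
            PySem.List.pyGetD ((aname.take k).map f) j 0
          else fl) (-1)
      = (PySem.List.pyRange 0 (((aname.take k).length : Nat) : Int) 1).foldl
        (fun fl j =>
          (fun fl (y : String) => if y == aname[k] then f y else fl) fl
            (PySem.List.pyGetD (aname.take k) j "")) (-1) := by
    rw [hlen]
    refine PySem.List.foldl_congr_mem _ _ _ _ (fun fl j hj => ?_)
    rw [PySem.List.mem_pyRange_one] at hj
    obtain ⟨hj0, hjk⟩ := hj
    have hjn : j.toNat < k := by omega
    have hg1 : PySem.List.pyGetD aname j "" = aname[j.toNat] := by
      rw [PySem.List.pyGetD_eq_getElem] <;> omega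
    have hg2 : PySem.List.pyGetD (aname.take k) j "" = aname[j.toNat] := by
      rw [PySem.List.pyGetD_eq_getElem]
      · simp [List.getElem_take]
      · exact hj0
      · simp; omega
    have hg3 : PySem.List.pyGetD ((aname.take k).map f) j 0 = f aname[j.toNat] := by
      rw [PySem.List.pyGetD_eq_getElem]
      · simp [List.getElem_take]
      · exact hj0
      · simp; omega
    simp only [hg1, hg2, hg3, hxk]
  rw [hcongr, PySem.List.foldl_pyRange_zero_pyGetD' (aname.take k) ""
      (fun fl (y : String) => if y == aname[k] then f y else fl) (-1),
    foldl_flag]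

-- index stability of the table under appending a new name
theorem pvF_append_of_mem (u : List String) (x name : String) (h : name ∈ u) :
    pvF (u ++ [x]) name = pvF u name := by
  unfold pvF
  rw [PySem.List.index?_append_of_mem _ h]

-- the outer-loop invariant of A: after processing the first k names the state is
-- (table size - 1, positions of the first k names, table of the first k names)
theorem loopA_inv (aname : List String) (hne : aname ≠ []) (k : Nat)
    (h1 : 1 ≤ k) (hk : k ≤ aname.length) :
    (PySem.List.pyRange 1 (k : Int) 1).foldl
      (fun (st : Int × List Int × List String) i =>
        let flag : Int :=
          (PySem.List.pyRange 0 i 1).foldl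
            (fun fl j =>
              if PySem.List.pyGetD aname j "" == PySem.List.pyGetD aname i "" then
                PySem.List.pyGetD st.2.1 j 0
              else fl)
            (-1)
        if flag == -1 then
          (st.1 + 1, st.2.1 ++ [st.1 + 1], st.2.2 ++ [PySem.List.pyGetD aname i ""])
        else
          (st.1, st.2.1 ++ [flag], st.2.2))
      (0, [0], [PySem.List.pyGetD aname 0 ""])
    = (((pvU (aname.take k)).length : Int) - 1,
       (aname.take k).map (pvF (pvU (aname.take k))),
       pvU (aname.take k)) := by
  induction k with
  | zero => omega
  | succ k ih =>
    by_cases hk1 : k = 0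
    · subst hk1
      obtain ⟨a, t, rfl⟩ : ∃ a t, aname = a :: t := by
        cases aname with
        | nil => exact absurd rfl hne
        | cons a t => exact ⟨a, t, rfl⟩
      rw [show ((1 : Nat) : Int) = 1 by norm_num, PySem.List.pyRange_one_eq_nil le_rfl]
      simp [pvU, pvAddNew, pvF, PySem.List.pyGetD]
    · have hk' : 1 ≤ k := by omega
      have hkl : k < aname.length := by omega
      have hsplit : PySem.List.pyRange 1 ((k + 1 : Nat) : Int) 1
          = PySem.List.pyRange 1 (k : Int) 1 ++ [(k : Int)] := by
        push_cast
        exact PySem.List.pyRange_one_succ_right (by exact_mod_cast hk')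
      rw [hsplit, List.foldl_append, ih hk' (by omega)]
      simp only [List.foldl_cons, List.foldl_nil]
      have hxk : PySem.List.pyGetD aname (k : Int) "" = aname[k] := by
        rw [PySem.List.pyGetD_eq_getElem] <;> simp [hkl]
      have hflag := flag_eq aname (pvF (pvU (aname.take k))) k hkl
      have htake : aname.take (k + 1) = aname.take k ++ [aname[k]] := by
        rw [List.take_add_one, List.getElem?_eq_getElem hkl]
        simp
      by_cases hmem : aname[k] ∈ aname.take k
      · -- seen before: flag = table position, table unchanged
        rw [hflag]
        simp only [hmem, if_true]
        have hne' : ¬ (pvF (pvU (aname.take k)) aname[k] == (-1 : Int)) = true := by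
          unfold pvF; simp only [beq_iff_eq]; intro h
          omega
        rw [if_neg (by simpa using hne'), htake]
        have hU : pvU (aname.take k ++ [aname[k]]) = pvU (aname.take k) := by
          rw [pvU_append]
          unfold pvAddNew
          rw [if_pos (by simpa [List.contains_eq_mem] using (mem_pvU _ _).mpr hmem)]
        rw [hU]
        refine Prod.ext rfl (Prod.ext ?_ rfl)
        simp only [List.map_append, List.map_cons, List.map_nil]
      · -- new name: appended to table at the end
        rw [hflag]
        simp only [hmem, if_false]
        rw [if_pos (by simp)]
        have hnotU : aname[k] ∉ pvU (aname.take k) := fun h => hmem ((mem_pvU _ _).mp h)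
        have hU : pvU (aname.take k ++ [aname[k]]) = pvU (aname.take k) ++ [aname[k]] := by
          rw [pvU_append]
          unfold pvAddNew
          rw [if_neg (by simpa [List.contains_eq_mem] using hnotU)]
        rw [htake, hU, hxk]
        have hidx : pvF (pvU (aname.take k) ++ [aname[k]]) aname[k]
            = ((pvU (aname.take k)).length : Int) := by
          unfold pvF
          rw [PySem.List.index?_append_singleton_self _ _ hnotU]
          simp
        refine Prod.ext (by simp only [List.length_append, List.length_cons, List.length_nil]; push_cast; omega) (Prod.ext ?_ rfl)
        simp only [List.map_append, List.map_cons, List.map_nil]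
        congr 1
        · exact List.map_congr_left fun name hname =>
            (pvF_append_of_mem _ _ _ ((mem_pvU _ _).mpr hname)).symm
        · rw [hidx]
          congr 1
          omega

theorem alt_eq (aname : List String) (hne : aname ≠ []) :
    create_atype_list_alt aname
      = (((pvU aname).length : Int), aname.map (pvF (pvU aname)), pvU aname) := by
  obtain ⟨a, t, rfl⟩ : ∃ a t, aname = a :: t := by
    cases aname with
    | nil => exact absurd rfl hne
    | cons a t => exact ⟨a, t, rfl⟩
  have hU : pvU (a :: t) = t.foldl pvAddNew [a] := by
    unfold pvU
    simp [pvAddNew]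
  unfold create_atype_list_alt
  have hg0 : PySem.List.pyGetD (a :: t) 0 "" = a := by
    simp [PySem.List.pyGetD]
  simp only [List.drop_one, List.tail_cons, hg0, hU]
  rfl

-- ===== VERDICT (by name: the statement is the Claim_ definition above) =====
theorem create_atype_list_spec : Claim_equal_create_atype_list := by
  intro aname _ hpre
  unfold Spec_create_atype_list
  have hlen : 1 ≤ aname.length := by
    cases aname with
    | nil => exact absurd rfl hpre
    | cons a t => simp
  unfold create_atype_list
  rw [loopA_inv aname hpre aname.length hlen le_rfl, List.take_length,
    alt_eq aname hpre]
  simp
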